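-- pv_equiv track=rewrite | github.com/SunnyWar/Cody | cody-graph/tools/apply_diff.py | _sanitize_diff
-- ===== SOURCE A (Python) =====
-- def _sanitize_diff(diff_content: str) -> str:
--     """Clean up diff format if LLM generated non-standard formatting.
--
--     Handles:
--     - *** Begin/End Patch markers
--     - Missing --- +++ headers
--     - Improper @@ markers
--     """
--     normalized = diff_content.replace("\r\n", "\n").replace("\r", "\n")
--     lines = normalized.strip().split("\n")
--
--     # Remove *** Begin Patch and *** End Patch markers
--     lines = [l for l in lines if not l.startswith('*** Begin') and not l.startswith('*** End')]
--
--     cleaned = []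
--     for line in lines:
--         # Convert *** markers to --- +++ format
--         if line.startswith('*** Update File:'):
--             filename = line.replace('*** Update File:', '').strip()
--             cleaned.append(f'--- a/{filename}')
--             cleaned.append(f'+++ b/{filename}')
--         else:
--             cleaned.append(line)
--
--     sanitized = "\n".join(cleaned).rstrip("\n") + "\n"
--     return sanitized
-- ===== SOURCE B (Python) =====
-- def _piece(line: str):
--     """Classify one line: None = drop it, otherwise the text it contributes
--     (an Update File marker contributes its two-line header as one chunk)."""
--     if line.startswith('*** Begin') or line.startswith('*** End'):
--         return None
--     if line.startswith('*** Update File:'):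
--         filename = line.replace('*** Update File:', '').strip()
--         return f'--- a/{filename}\n+++ b/{filename}'
--     return line
--
--
-- def _sanitize_diff(diff_content: str) -> str:
--     """Single reverse pass: walk the lines bottom-up, skip dropped lines and
--     any blank lines below the last content (which replaces the final rstrip),
--     and emit the kept chunks back-to-front."""
--     normalized = diff_content.replace("\r\n", "\n").replace("\r", "\n")
--     out = []
--     for line in reversed(normalized.strip().split("\n")):
--         piece = _piece(line)
--         if piece is None:
--             continue
--         if not out and piece == "":
--             continue
--         out.append(piece)
--     return "\n".join(reversed(out)) + "\n"
-- ===== Notes on version B (the rewrite author's own statement) =====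
-- stated objective: alternative
-- what changed: Replaced A's forward two-phase pipeline (filter comprehension, then a conversion loop building a second list, then join + a final rstrip) with one bottom-up pass: iterate the lines in reverse, classify each line once into an optional chunk, suppress blank chunks until the first kept content (which subsumes the final rstrip), and join the reversed accumulator.
import Mathlib
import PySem

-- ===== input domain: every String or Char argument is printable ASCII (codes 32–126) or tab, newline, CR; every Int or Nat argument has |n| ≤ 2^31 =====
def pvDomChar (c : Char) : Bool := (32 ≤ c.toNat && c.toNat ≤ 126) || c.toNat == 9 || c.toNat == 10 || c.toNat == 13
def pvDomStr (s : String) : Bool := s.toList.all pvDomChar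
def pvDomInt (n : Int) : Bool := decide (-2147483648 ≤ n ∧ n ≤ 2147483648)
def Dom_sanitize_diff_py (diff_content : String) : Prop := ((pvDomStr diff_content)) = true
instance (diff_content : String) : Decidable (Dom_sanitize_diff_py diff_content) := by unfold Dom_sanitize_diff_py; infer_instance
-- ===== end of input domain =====

-- B replaces A's forward pipeline (filter comprehension, conversion loop, join, final rstrip)
-- by one bottom-up pass over the reversed lines that classifies each line once and suppresses
-- trailing blanks as it goes; objective: alternative (same cost, different traversal).

-- shared hand port of Python's s.rstrip("\n") (exact: drops exactly the trailing '\n' characters)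
def pvRstripNl (cs : List Char) : List Char := (cs.reverse.dropWhile (· == '\n')).reverse

-- ===== PORT A =====
def sanitize_diff_py (diff_content : String) : String :=
  let normalized := PySem.Str.replace (PySem.Str.replace diff_content "\r\n" "\n") "\r" "\n"
  let lines := PySem.Chars.splitOn (PySem.Chars.strip normalized.toList) ['\n']
  let lines := lines.filter (fun l =>
    !(PySem.Chars.startswith l "*** Begin".toList) && !(PySem.Chars.startswith l "*** End".toList))
  let cleaned := lines.foldl (fun acc line =>
    if PySem.Chars.startswith line "*** Update File:".toList then
      let filename := PySem.Chars.strip (PySem.Chars.replace line "*** Update File:".toList [])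
      acc ++ [("--- a/".toList ++ filename), ("+++ b/".toList ++ filename)]
    else acc ++ [line]) []
  String.ofList (pvRstripNl (PySem.Chars.join ['\n'] cleaned) ++ ['\n'])

-- ===== PORT B =====
-- port of Source B's _piece: None = drop the line, otherwise the chunk it contributes
def pvPiece (line : List Char) : Option (List Char) :=
  if PySem.Chars.startswith line "*** Begin".toList || PySem.Chars.startswith line "*** End".toList then
    none
  else if PySem.Chars.startswith line "*** Update File:".toList then
    let filename := PySem.Chars.strip (PySem.Chars.replace line "*** Update File:".toList [])
    some ("--- a/".toList ++ filename ++ '\n' :: "+++ b/".toList ++ filename)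
  else some line

def sanitize_diff_py_alt (diff_content : String) : String :=
  let normalized := PySem.Str.replace (PySem.Str.replace diff_content "\r\n" "\n") "\r" "\n"
  -- one loop over the REVERSED lines; 'out.append' is 'out ++ [piece]', the final
  -- 'reversed(out)' is 'out.reverse'; 'if not out and piece == "": continue' skips
  -- blank chunks while nothing has been kept yet (this replaces A's final rstrip)
  let out := (PySem.Chars.splitOn (PySem.Chars.strip normalized.toList) ['\n']).reverse.foldl
    (fun out line =>
      match pvPiece line with
      | none => out
      | some piece => if out.isEmpty && piece.isEmpty then out else out ++ [piece]) []
  String.ofList (PySem.Chars.join ['\n'] out.reverse ++ ['\n'])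

-- ===== PRECONDITION & SPEC =====
def Spec_sanitize_diff_py (diff_content : String) (out : String) : Prop := out = sanitize_diff_py_alt diff_content
instance (diff_content : String) (out : String) : Decidable (Spec_sanitize_diff_py diff_content out) := by unfold Spec_sanitize_diff_py; infer_instance

-- ===== CLAIM (what is proved, stated in full; the proofs are below) =====
def Claim_equal_sanitize_diff_py : Prop := ∀ (diff_content : String), Dom_sanitize_diff_py diff_content → Spec_sanitize_diff_py diff_content (sanitize_diff_py diff_content)

-- ===== LEMMAS AND PROOFS =====

-- abbreviations for the proofs (A's filter predicate, A's per-line expansion, B's step)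
def pvKeep (l : List Char) : Bool :=
  !(PySem.Chars.startswith l "*** Begin".toList) && !(PySem.Chars.startswith l "*** End".toList)

def pvExpand (line : List Char) : List (List Char) :=
  if PySem.Chars.startswith line "*** Update File:".toList then
    let filename := PySem.Chars.strip (PySem.Chars.replace line "*** Update File:".toList [])
    [("--- a/".toList ++ filename), ("+++ b/".toList ++ filename)]
  else [line]

def pvStep (line : List Char) (out : List (List Char)) : List (List Char) :=
  match pvPiece line with
  | none => out
  | some piece => if out.isEmpty && piece.isEmpty then out else out ++ [piece]

-- rstrip("\n") distributes over append
lemma pvRstripNl_append (xs ys : List Char) :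
    pvRstripNl (xs ++ ys) = if pvRstripNl ys = [] then pvRstripNl xs else xs ++ pvRstripNl ys := by
  unfold pvRstripNl
  rw [List.reverse_append, List.dropWhile_append]
  by_cases h : List.dropWhile (fun x => x == '\n') ys.reverse = []
  · simp [List.isEmpty_iff, h]
  · rw [if_neg (by simpa [List.isEmpty_iff] using h), if_neg (by simpa using h),
      List.reverse_append, List.reverse_reverse]

-- a list without '\n' is its own rstrip("\n")
lemma pvRstripNl_of_not_mem {cs : List Char} (h : '\n' ∉ cs) : pvRstripNl cs = cs := by
  unfold pvRstripNl
  have : cs.reverse.dropWhile (· == '\n') = cs.reverse := by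
    cases hr : cs.reverse with
    | nil => rfl
    | cons c t =>
      have hc : c ∈ cs := by
        have : c ∈ cs.reverse := by rw [hr]; exact List.mem_cons_self
        simpa using this
      have : (c == '\n') = false := by
        simp only [beq_eq_false_iff_ne]; intro he; exact h (he ▸ hc)
      simp [this]
  rw [this, List.reverse_reverse]

-- dropping '\n's after dropping all whitespace drops nothing
lemma pvDropNl_dropSpace (W : List Char) :
    List.dropWhile (fun x => x == '\n') (List.dropWhile PySem.Chars.isspace W)
      = List.dropWhile PySem.Chars.isspace W := by
  induction W with
  | nil => rfl
  | cons c t ih =>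
    by_cases h : PySem.Chars.isspace c = true
    · simp [h, ih]
    · have hn : (c == '\n') = false := by
        simp only [beq_eq_false_iff_ne]; intro he; subst he; exact h (by decide)
      simp [h, hn]

-- a stripped string is its own rstrip("\n")
lemma pvRstripNl_strip (X : List Char) : pvRstripNl (PySem.Chars.strip X) = PySem.Chars.strip X := by
  unfold pvRstripNl PySem.Chars.strip PySem.Chars.rstrip
  rw [List.reverse_reverse]
  rw [pvDropNl_dropSpace]

-- the update piece never ends in '\n'
lemma pvRstripNl_update (name : List Char) (hname : pvRstripNl name = name) :
    pvRstripNl ("--- a/".toList ++ name ++ '\n' :: "+++ b/".toList ++ name)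
      = "--- a/".toList ++ name ++ '\n' :: "+++ b/".toList ++ name := by
  have htail : pvRstripNl ("+++ b/".toList ++ name) = "+++ b/".toList ++ name := by
    rw [pvRstripNl_append]
    by_cases h : pvRstripNl name = []
    · have hn : name = [] := hname ▸ h
      rw [if_pos h, pvRstripNl_of_not_mem (by decide : '\n' ∉ "+++ b/".toList), hn]
      simp
    · rw [if_neg h, hname]
  have hsplit : "--- a/".toList ++ name ++ '\n' :: "+++ b/".toList ++ name
      = ("--- a/".toList ++ name ++ ['\n']) ++ ("+++ b/".toList ++ name) := by
    simp
  rw [hsplit, pvRstripNl_append, htail, if_neg (by simp)]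

-- joining one more chunk on top, through rstrip("\n")
lemma pvJoinStep (p : List Char) (rest : List (List Char)) (hp : pvRstripNl p = p) :
    pvRstripNl (PySem.Chars.join ['\n'] (p :: rest))
      = if pvRstripNl (PySem.Chars.join ['\n'] rest) = [] then p
        else p ++ '\n' :: pvRstripNl (PySem.Chars.join ['\n'] rest) := by
  cases rest with
  | nil =>
    rw [PySem.Chars.join_singleton, PySem.Chars.join_nil, hp,
      if_pos (show pvRstripNl ([] : List Char) = [] from rfl)]
  | cons r rs =>
    rw [PySem.Chars.join_cons_cons,
      List.append_assoc p ['\n'] (PySem.Chars.join ['\n'] (r :: rs)),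
      pvRstripNl_append p (['\n'] ++ PySem.Chars.join ['\n'] (r :: rs)),
      pvRstripNl_append ['\n'] (PySem.Chars.join ['\n'] (r :: rs))]
    by_cases h : pvRstripNl (PySem.Chars.join ['\n'] (r :: rs)) = []
    · rw [if_pos h, if_pos h, if_pos (show pvRstripNl ['\n'] = [] by rfl), hp]
    · rw [if_neg h, if_neg h, if_neg (by simp)]
      simp

-- the two update header lines join to the single two-line chunk
lemma pvJoinGlue (a b : List Char) (rest : List (List Char)) :
    PySem.Chars.join ['\n'] (a :: b :: rest) = PySem.Chars.join ['\n'] ((a ++ '\n' :: b) :: rest) := by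
  cases rest with
  | nil => simp [PySem.Chars.join_cons_cons, PySem.Chars.join_singleton]
  | cons r rs => simp [PySem.Chars.join_cons_cons]

-- join of a chunk list, one cons at a time
lemma pvJoinCons (p : List Char) (rest : List (List Char)) :
    PySem.Chars.join ['\n'] (p :: rest)
      = if rest = [] then p else p ++ '\n' :: PySem.Chars.join ['\n'] rest := by
  cases rest with
  | nil => simp [PySem.Chars.join_singleton]
  | cons r rs => simp [PySem.Chars.join_cons_cons]

-- every piece of splitOn s "\n" is free of '\n'
lemma pvSplitGo_no_nl : ∀ (fuel : Nat) (l cur : List Char) (acc : List (List Char)),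
    l.length < fuel → '\n' ∉ cur → (∀ m ∈ acc, '\n' ∉ m) →
    ∀ m ∈ PySem.Chars.splitOn.go ['\n'] fuel l cur acc, '\n' ∉ m := by
  intro fuel
  induction fuel with
  | zero => intro l cur acc h; omega
  | succ fuel ih =>
    intro l cur acc hlen hcur hacc m hm
    cases l with
    | nil =>
      rw [PySem.Chars.splitOn.go] at hm
      simp only [List.mem_reverse, List.mem_cons] at hm
      rcases hm with h | h
      · subst h; simpa using hcur
      · exact hacc m h
      all_goals omega
    | cons c rest =>
      rw [PySem.Chars.splitOn.go] at hm
      by_cases hpre : List.isPrefixOf ['\n'] (c :: rest) = true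
      · rw [if_pos hpre] at hm
        simp only [List.length_cons] at hlen
        refine ih _ [] _ (by simpa using Nat.lt_of_succ_lt_succ hlen) (by simp) ?_ m hm
        intro m' hm'
        rcases List.mem_cons.mp hm' with h | h
        · subst h; simpa using hcur
        · exact hacc m' h
      · have hc : c ≠ '\n' := by
          intro he; subst he; exact hpre (by simp [List.isPrefixOf])
        rw [if_neg hpre] at hm
        simp only [List.length_cons] at hlen
        refine ih rest (c :: cur) acc (Nat.lt_of_succ_lt_succ hlen) ?_ hacc m hm
        intro hmem
        rcases List.mem_cons.mp hmem with h | h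
        · exact hc h.symm
        · exact hcur h

lemma pvSplitOn_no_nl (s : List Char) : ∀ m ∈ PySem.Chars.splitOn s ['\n'], '\n' ∉ m := by
  intro m hm
  unfold PySem.Chars.splitOn at hm
  exact pvSplitGo_no_nl (s.length + 1) s [] [] (by omega) (by simp) (by simp) m hm

-- one kept chunk, pushed through B's accumulator step and A's join+rstrip
lemma pvMainStep (p : List Char) (out : List (List Char)) (rest : List (List Char))
    (hp : pvRstripNl p = p)
    (ihj : PySem.Chars.join ['\n'] out.reverse = pvRstripNl (PySem.Chars.join ['\n'] rest))
    (ihe : out = [] ↔ pvRstripNl (PySem.Chars.join ['\n'] rest) = []) :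
    PySem.Chars.join ['\n'] (if out.isEmpty && p.isEmpty then out else out ++ [p]).reverse
        = pvRstripNl (PySem.Chars.join ['\n'] (p :: rest))
    ∧ ((if out.isEmpty && p.isEmpty then out else out ++ [p]) = []
        ↔ pvRstripNl (PySem.Chars.join ['\n'] (p :: rest)) = []) := by
  rw [pvJoinStep p rest hp]
  by_cases hout : out = []
  · have hrnil : pvRstripNl (PySem.Chars.join ['\n'] rest) = [] := ihe.mp hout
    rw [if_pos hrnil]
    subst hout
    by_cases hpnil : p = []
    · subst hpnil
      simp
    · rw [if_neg (by simp [hpnil])]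
      constructor
      · simp [PySem.Chars.join_singleton]
      · simp [hpnil]
  · have hrne : pvRstripNl (PySem.Chars.join ['\n'] rest) ≠ [] := fun h => hout (ihe.mpr h)
    rw [if_neg hrne, if_neg (by simp [hout])]
    constructor
    · rw [List.reverse_append, List.reverse_singleton, List.singleton_append, pvJoinCons,
        if_neg (by simpa using hout), ihj]
    · simp

-- THE MAIN INVARIANT: B's bottom-up accumulator, reversed and joined, is the rstrip of
-- the join of A's cleaned lines; and it is empty exactly when that rstrip is empty.
lemma pvMain (lines : List (List Char)) (hnl : ∀ l ∈ lines, '\n' ∉ l) :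
    PySem.Chars.join ['\n'] (lines.foldr pvStep []).reverse
      = pvRstripNl (PySem.Chars.join ['\n'] ((lines.filter pvKeep).flatMap pvExpand))
    ∧ ((lines.foldr pvStep []) = []
      ↔ pvRstripNl (PySem.Chars.join ['\n'] ((lines.filter pvKeep).flatMap pvExpand)) = []) := by
  induction lines with
  | nil => simp [PySem.Chars.join_nil, pvRstripNl]
  | cons l ls ih =>
    have hnl_l : '\n' ∉ l := hnl l List.mem_cons_self
    obtain ⟨ihj, ihe⟩ := ih (fun x hx => hnl x (List.mem_cons_of_mem _ hx))
    by_cases hbe : (PySem.Chars.startswith l "*** Begin".toList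
        || PySem.Chars.startswith l "*** End".toList) = true
    · -- dropped line: both sides ignore it
      have hkeep : pvKeep l = false := by
        unfold pvKeep; rw [← Bool.not_or, hbe]; rfl
      have hstep : pvStep l (ls.foldr pvStep []) = ls.foldr pvStep [] := by
        unfold pvStep pvPiece; rw [if_pos hbe]
      rw [List.foldr_cons, hstep, List.filter_cons, if_neg (by simp [hkeep])]
      exact ⟨ihj, ihe⟩
    · have hkeep : pvKeep l = true := by
        unfold pvKeep; rw [← Bool.not_or, Bool.of_not_eq_true hbe]; rfl
      rw [List.foldr_cons, List.filter_cons, if_pos (by simp [hkeep]), List.flatMap_cons]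
      by_cases hupd : PySem.Chars.startswith l "*** Update File:".toList = true
      · set name := PySem.Chars.strip (PySem.Chars.replace l "*** Update File:".toList []) with hname
        set p := "--- a/".toList ++ name ++ '\n' :: "+++ b/".toList ++ name with hpdef
        have hstep : pvStep l (ls.foldr pvStep []) =
            (if (ls.foldr pvStep []).isEmpty && p.isEmpty then ls.foldr pvStep []
             else ls.foldr pvStep [] ++ [p]) := by
          unfold pvStep pvPiece
          rw [if_neg hbe, if_pos hupd]
        have hexp : pvExpand l = [("--- a/".toList ++ name), ("+++ b/".toList ++ name)] := by
          unfold pvExpand; rw [if_pos hupd]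
        have hglue : PySem.Chars.join ['\n'] (pvExpand l ++ (ls.filter pvKeep).flatMap pvExpand)
            = PySem.Chars.join ['\n'] (p :: (ls.filter pvKeep).flatMap pvExpand) := by
          rw [hexp, List.cons_append, List.singleton_append,
            pvJoinGlue ("--- a/".toList ++ name) ("+++ b/".toList ++ name)]
          rw [hpdef]
          simp
        rw [hstep, hglue]
        exact pvMainStep p _ _ (hpdef ▸ pvRstripNl_update name (pvRstripNl_strip _)) ihj ihe
      · have hstep : pvStep l (ls.foldr pvStep []) =
            (if (ls.foldr pvStep []).isEmpty && l.isEmpty then ls.foldr pvStep []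
             else ls.foldr pvStep [] ++ [l]) := by
          unfold pvStep pvPiece
          rw [if_neg hbe, if_neg hupd]
        have hexp : pvExpand l = [l] := by unfold pvExpand; rw [if_neg hupd]
        rw [hstep, hexp, List.singleton_append]
        exact pvMainStep l _ _ (pvRstripNl_of_not_mem hnl_l) ihj ihe

-- A's conversion loop in flatMap form
lemma pvFoldA (lines : List (List Char)) :
    lines.foldl (fun acc line =>
      if PySem.Chars.startswith line "*** Update File:".toList then
        let filename := PySem.Chars.strip (PySem.Chars.replace line "*** Update File:".toList [])
        acc ++ [("--- a/".toList ++ filename), ("+++ b/".toList ++ filename)]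
      else acc ++ [line]) [] = lines.flatMap pvExpand := by
  have h : (fun (acc : List (List Char)) line =>
      if PySem.Chars.startswith line "*** Update File:".toList then
        let filename := PySem.Chars.strip (PySem.Chars.replace line "*** Update File:".toList [])
        acc ++ [("--- a/".toList ++ filename), ("+++ b/".toList ++ filename)]
      else acc ++ [line]) = fun acc line => acc ++ pvExpand line := by
    funext acc line
    unfold pvExpand
    split_ifs <;> rfl
  rw [h, PySem.List.foldl_append_eq_flatMap]
  simp

-- ===== VERDICT (by name: the statement is the Claim_ definition above) =====
theorem sanitize_diff_py_spec : Claim_equal_sanitize_diff_py := by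
  intro diff_content _
  unfold Spec_sanitize_diff_py
  simp only [sanitize_diff_py, sanitize_diff_py_alt]
  rw [pvFoldA]
  refine congrArg (fun cl => String.ofList (cl ++ ['\n'])) ?_
  rw [List.foldl_reverse]
  exact ((pvMain _ (pvSplitOn_no_nl _)).1).symm
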